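-- pv_equiv track=rewrite | github.com/mariekevdh/fact-checking-dataset | clean_filter_data.py | find_interaction
-- ===== SOURCE A (Python) =====
-- def find_interaction(example):
--     """
--         Determines if there is interaction in a discussion, defined by user 1 commenting after another user.
--
--         Args:
--             example (dict): A dictionary representing a single example from the dataset, containing a 'COMMENTS' field.
--
--         Returns:
--             bool: True if interaction is found, False otherwise.
--     """
--     users = [comment['USER'] for comment in example['COMMENTS']]
--     if len(set(users)) > 1:
--         user_two = None
--         for i, user in enumerate(users):
--             if i > 0:
--                 if user != users[0]:
--                     user_two = i
--                     break
--         if user_two: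
--             if users[0] in users[user_two:]:
--                 return True
--     return False
-- ===== SOURCE B (Python) =====
-- def find_interaction(example):
--     """Single pass with a seen-other flag instead of list/set/index/slice passes."""
--     comments = example['COMMENTS']
--     if not comments:
--         return False
--     first = comments[0]['USER']
--     seen_other = False
--     for comment in comments:
--         u = comment['USER']
--         if seen_other and u == first:
--             return True
--         if u != first:
--             seen_other = True
--     return False
-- ===== Notes on version B (the rewrite author's own statement) =====
-- stated objective: simpler
-- what changed: Replaces building the user list, a set-cardinality check, an indexed scan for the first differing user and a suffix-slice membership test by one pass over the comments that maintains a single seen_other flag.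
import Mathlib
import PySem

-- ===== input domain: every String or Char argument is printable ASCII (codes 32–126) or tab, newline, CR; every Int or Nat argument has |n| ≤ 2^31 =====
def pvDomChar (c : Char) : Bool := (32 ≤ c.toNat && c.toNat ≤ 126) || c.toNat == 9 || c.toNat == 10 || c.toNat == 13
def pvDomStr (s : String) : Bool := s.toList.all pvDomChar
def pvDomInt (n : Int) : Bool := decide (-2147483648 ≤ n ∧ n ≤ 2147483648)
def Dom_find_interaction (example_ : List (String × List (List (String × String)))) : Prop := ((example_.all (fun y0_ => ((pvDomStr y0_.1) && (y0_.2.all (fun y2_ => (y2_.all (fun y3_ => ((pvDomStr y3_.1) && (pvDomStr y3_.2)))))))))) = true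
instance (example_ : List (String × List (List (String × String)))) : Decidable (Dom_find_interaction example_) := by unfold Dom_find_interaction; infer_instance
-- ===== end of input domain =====

-- B is a single pass keeping a seen_other flag instead of A's user list, set-size check,
-- indexed scan and suffix-slice membership; same return value on every input admitted by Pre_.

-- ===== PORT A =====
-- comment['USER'] (KeyError → none, excluded by Pre_; totalized with "")
def pvUserA (c : List (String × String)) : String :=
  ((PySem.Dict.mk c).get? "USER").getD ""

-- the 'for i, user in enumerate(users): if i > 0 and user != users[0]: user_two = i; break' loop
def pvFindTwo (u0 : String) (users : List String) (i : Nat) : Option Nat :=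
  match users with
  | [] => none
  | u :: rest => if i > 0 && u != u0 then some i else pvFindTwo u0 rest (i + 1)

def find_interaction (example_ : List (String × List (List (String × String)))) : Bool :=
  -- example['COMMENTS'] (KeyError → none, excluded by Pre_; totalized with [])
  let comments := ((PySem.Dict.mk example_).get? "COMMENTS").getD []
  let users := comments.map pvUserA
  if (PySem.Set.ofList users).length > 1 then
    let u0 := PySem.List.pyGetD users 0 ""
    match pvFindTwo u0 users 0 with
    | some i =>
        if i = 0 then false   -- 'if user_two:' — Python truthiness of the index
        else (PySem.List.slice users (some (i : Int)) none).contains u0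
    | none => false
  else false

-- ===== PORT B =====
-- the 'for comment in comments' loop of Source B, carrying the seen_other flag
def pvAltLoop (first : String) (comments : List (List (String × String))) (seenOther : Bool) : Bool :=
  match comments with
  | [] => false
  | c :: rest =>
    let u := ((PySem.Dict.mk c).get? "USER").getD ""
    if seenOther && u == first then true
    else pvAltLoop first rest (seenOther || u != first)

def find_interaction_alt (example_ : List (String × List (List (String × String)))) : Bool :=
  let comments := ((PySem.Dict.mk example_).get? "COMMENTS").getD []
  match comments with
  | [] => false
  | c0 :: _ =>
    let first := ((PySem.Dict.mk c0).get? "USER").getD ""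
    pvAltLoop first comments false

-- ===== PRECONDITION & SPEC =====
-- Pre_ excludes exactly the inputs on which Python A raises KeyError:
-- a missing 'COMMENTS' key, or a comment without a 'USER' key.
def Pre_find_interaction (example_ : List (String × List (List (String × String)))) : Prop :=
  (PySem.Dict.mk example_).contains "COMMENTS" = true ∧
  (((PySem.Dict.mk example_).get? "COMMENTS").getD []).all
    (fun c => (PySem.Dict.mk c).contains "USER") = true
instance (example_ : List (String × List (List (String × String)))) : Decidable (Pre_find_interaction example_) := by unfold Pre_find_interaction; infer_instance

def pvWitness_find_interaction : (List (String × List (List (String × String)))) :=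
  [("COMMENTS", [[("USER", "a")], [("USER", "b")], [("USER", "a")]])]

def Spec_find_interaction (example_ : List (String × List (List (String × String)))) (out : Bool) : Prop := out = find_interaction_alt example_
instance (example_ : List (String × List (List (String × String)))) (out : Bool) : Decidable (Spec_find_interaction example_ out) := by unfold Spec_find_interaction; infer_instance

-- ===== CLAIM (what is proved, stated in full; the proofs are below) =====
def Claim_equal_find_interaction : Prop := ∀ (example_ : List (String × List (List (String × String)))), Dom_find_interaction example_ → Pre_find_interaction example_ → Spec_find_interaction example_ (find_interaction example_)

-- ===== LEMMAS AND PROOFS =====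

-- dropping the leading all-`u0` block by length equals dropWhile
theorem pvDrop_takeWhile (p : String → Bool) (l : List String) :
    l.drop (l.takeWhile p).length = l.dropWhile p := by
  induction l with
  | nil => rfl
  | cons a t ih => by_cases h : p a <;> simp [h, ih]

-- once seen_other is set, B's loop is a plain membership scan for `first`
theorem pvAltLoop_true (first : String) (l : List (List (String × String))) :
    pvAltLoop first l true = (l.map pvUserA).contains first := by
  induction l with
  | nil => simp [pvAltLoop]
  | cons c rest ih =>
    by_cases h : ((PySem.Dict.mk c).get? "USER").getD "" = first
    · simp [pvAltLoop, pvUserA, h]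
    · simp [pvAltLoop, pvUserA, h, ih, Ne.symm h]

-- while the flag is off, B's loop skips the leading block of `first`-comments
theorem pvAltLoop_false (first : String) (l : List (List (String × String))) :
    pvAltLoop first l false
      = (((l.map pvUserA).dropWhile (fun x => x == first)).contains first) := by
  induction l with
  | nil => simp [pvAltLoop]
  | cons c rest ih =>
    by_cases h : ((PySem.Dict.mk c).get? "USER").getD "" = first
    · simpa [pvAltLoop, pvUserA, h] using ih
    · have hb : ((((PySem.Dict.mk c).get? "USER").getD "") != first) = true := by
        simp [bne_iff_ne, h]
      simp [pvAltLoop, pvUserA, h, Ne.symm h, hb, pvAltLoop_true]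

-- A's enumerate loop, started past index 0, finds the index just after the leading block of u0's
theorem pvFindTwo_eq (u0 : String) (l : List String) (n : Nat) :
    pvFindTwo u0 l (n + 1)
      = if l.dropWhile (fun x => x == u0) = [] then none
        else some (n + 1 + (l.takeWhile (fun x => x == u0)).length) := by
  induction l generalizing n with
  | nil => simp [pvFindTwo]
  | cons u rest ih =>
    by_cases h : u = u0
    · subst h
      have hg : pvFindTwo u (u :: rest) (n + 1) = pvFindTwo u rest (n + 2) := by
        simp [pvFindTwo]
      rw [hg, show n + 2 = (n + 1) + 1 from rfl, ih (n + 1)]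
      simp only [List.dropWhile_cons, List.takeWhile_cons, beq_self_eq_true, if_true]
      split_ifs with hd
      · rfl
      · simp; omega
    · simp [pvFindTwo, h, bne_iff_ne]

-- the set-size test: more than one distinct user iff some tail user differs from the first
theorem pvSet_gt_one (u0 : String) (us : List String) :
    ((PySem.Set.ofList (u0 :: us)).length > 1) ↔ ∃ x ∈ us, x ≠ u0 := by
  rw [PySem.Set.ofList_cons]
  simp only [List.length_cons, gt_iff_lt, Nat.lt_succ_iff]
  constructor
  · intro h
    rcases List.exists_mem_of_ne_nil _ (List.ne_nil_of_length_pos h) with ⟨x, hx⟩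
    have := (PySem.Set.mem_discard (PySem.Set.ofList us) u0 x).mp hx
    exact ⟨x, (PySem.Set.mem_ofList us x).mp this.1, this.2⟩
  · rintro ⟨x, hx, hne⟩
    have : x ∈ PySem.Set.discard (PySem.Set.ofList us) u0 :=
      (PySem.Set.mem_discard _ _ _).mpr ⟨(PySem.Set.mem_ofList us x).mpr hx, hne⟩
    exact List.length_pos_of_mem this

-- both programs reduced to the users list: A's branch structure equals B's flag loop
theorem core_eq (u0 : String) (us : List String) :
    (if (PySem.Set.ofList (u0 :: us)).length > 1 then
        match pvFindTwo u0 (u0 :: us) 0 with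
        | some i => if i = 0 then false
            else (PySem.List.slice (u0 :: us) (some (i : Int)) none).contains u0
        | none => false
      else false)
    = ((us.dropWhile (fun x => x == u0)).contains u0) := by
  by_cases hc : (PySem.Set.ofList (u0 :: us)).length > 1
  · rcases (pvSet_gt_one u0 us).mp hc with ⟨x, hx, hne⟩
    have hdw : us.dropWhile (fun x => x == u0) ≠ [] := by
      intro h
      have := List.dropWhile_eq_nil_iff.mp h
      exact hne (by simpa using this x hx)
    have h0 : pvFindTwo u0 (u0 :: us) 0 = pvFindTwo u0 us 1 := by
      simp [pvFindTwo]
    rw [if_pos hc, h0, show (1 : Nat) = 0 + 1 from rfl, pvFindTwo_eq u0 us 0, if_neg hdw]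
    have hlen : ¬ (0 + 1 + (us.takeWhile (fun x => x == u0)).length = 0) := by omega
    simp only [hlen, if_false, zero_add]
    rw [PySem.List.slice_from_natCast]
    have hdrop : (u0 :: us).drop (1 + (us.takeWhile (fun x => x == u0)).length)
        = us.dropWhile (fun x => x == u0) := by
      rw [Nat.add_comm, List.drop_succ_cons, pvDrop_takeWhile]
    rw [hdrop]
  · rw [if_neg hc]
    have hall : ∀ x ∈ us, x = u0 := by
      intro x hx
      by_contra hne
      exact hc ((pvSet_gt_one u0 us).mpr ⟨x, hx, hne⟩)
    have : us.dropWhile (fun x => x == u0) = [] :=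
      List.dropWhile_eq_nil_iff.mpr (fun x hx => by simp [hall x hx])
    simp [this]

-- ===== VERDICT (by name: the statement is the Claim_ definition above) =====
theorem find_interaction_spec : Claim_equal_find_interaction := by
  intro example_ _ _
  unfold Spec_find_interaction find_interaction find_interaction_alt
  cases hcm : ((PySem.Dict.mk example_).get? "COMMENTS").getD [] with
  | nil => simp
  | cons c0 rest =>
    have hB : pvAltLoop (((PySem.Dict.mk c0).get? "USER").getD "") (c0 :: rest) false
        = pvAltLoop (((PySem.Dict.mk c0).get? "USER").getD "") rest false := by
      simp [pvAltLoop]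
    simp only [hB, pvAltLoop_false]
    have hmap : (c0 :: rest).map pvUserA = pvUserA c0 :: rest.map pvUserA := rfl
    have hu0 : PySem.List.pyGetD (pvUserA c0 :: rest.map pvUserA) 0 "" = pvUserA c0 := by
      simp [PySem.List.pyGetD, PySem.List.pyGet?, PySem.List.pyIdx?]
    rw [hmap, hu0]
    exact core_eq (pvUserA c0) (rest.map pvUserA)
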